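-- pv_equiv track=rewrite | github.com/nifemiEatsBlocks/multi-cipher-Encryption-tool | baconian.py | baconian_decrypt
-- ===== SOURCE A (Python) =====
-- def baconian_decrypt(ciphertext):
--     alphabet = "ABCDEFGHIJKLMNOPQRSTUVWXYZ"
--     lookup = {}
--     for i in range(26):
--         binary = bin(i)[2:].zfill(5)
--         code = binary.replace("0", "A").replace('1', 'B')
--         lookup[code] = alphabet[i]
--
--     plaintext = ""
--
--     cleaned_cipher = ciphertext.replace(" ", "").upper()
--
--     for i in range(0, len(cleaned_cipher), 5):
--         chunk = cleaned_cipher[i:i +5]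
--         if chunk in lookup:
--             plaintext += lookup[chunk]
--         else:
--             plaintext += "?"
--     return plaintext
-- ===== SOURCE B (Python) =====
-- def baconian_decrypt(ciphertext):
--     alphabet = "ABCDEFGHIJKLMNOPQRSTUVWXYZ"
--     cleaned = ciphertext.replace(" ", "").upper()
--     out = []
--     while cleaned:
--         chunk, cleaned = cleaned[:5], cleaned[5:]
--         if len(chunk) == 5 and all(c in "AB" for c in chunk):
--             value = 0
--             for c in chunk:
--                 value = value * 2 + (1 if c == "B" else 0)
--             out.append(alphabet[value] if value < 26 else "?")
--         else:
--             out.append("?")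
--     return "".join(out)
-- ===== Notes on version B (the rewrite author's own statement) =====
-- stated objective: idiomatic
-- what changed: Replaces the precomputed reverse-lookup dict and index-stride loop by a take-5/drop-5 chunking loop that decodes each chunk arithmetically (A=0, B=1 bits) and indexes the alphabet, emitting a question mark for short, non-A/B or out-of-range chunks.
import Mathlib
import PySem

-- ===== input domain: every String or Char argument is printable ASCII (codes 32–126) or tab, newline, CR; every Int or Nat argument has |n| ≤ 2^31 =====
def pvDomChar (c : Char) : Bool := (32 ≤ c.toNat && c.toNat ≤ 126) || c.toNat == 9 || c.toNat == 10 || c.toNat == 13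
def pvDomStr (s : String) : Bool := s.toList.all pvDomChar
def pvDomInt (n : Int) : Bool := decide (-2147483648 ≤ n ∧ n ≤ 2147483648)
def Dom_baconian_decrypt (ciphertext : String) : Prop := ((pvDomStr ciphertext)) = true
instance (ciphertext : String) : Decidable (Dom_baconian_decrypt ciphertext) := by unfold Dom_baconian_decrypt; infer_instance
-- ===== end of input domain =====

-- B drops A's precomputed reverse-lookup dict: it chunks the cleaned text 5 at a time and
-- decodes each chunk arithmetically (A=0/B=1 bits, index into the alphabet); same-value, idiomatic rewrite.

-- ===== PORT A =====
def pvAlphabet : List Char :=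
  ['A','B','C','D','E','F','G','H','I','J','K','L','M','N','O','P','Q','R','S','T','U','V','W','X','Y','Z']

-- bin(i)[2:] for a positive argument: most-significant-bit-first binary digits
-- (structural fuel recursion so the kernel can evaluate it; fuel n always suffices)
def pvBinAux : Nat → Nat → List Char
  | 0, _ => []
  | fuel + 1, n => if n = 0 then [] else pvBinAux fuel (n / 2) ++ [if n % 2 = 1 then '1' else '0']

def pvBinDigits (n : Nat) : List Char := pvBinAux n n

-- the dict built by A's first loop: code (five 'A'/'B' chars) → letter
def pvLookup : PySem.Dict (List Char) Char :=
  (PySem.List.pyRange 0 26 1).foldl (fun d i =>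
    -- binary = bin(i)[2:].zfill(5)  (bin(0)[2:] is "0")
    let binary := PySem.Chars.zfill (if i = 0 then ['0'] else pvBinDigits i.toNat) 5
    let code := PySem.Chars.replace (PySem.Chars.replace binary ['0'] ['A']) ['1'] ['B']
    d.insert code (PySem.List.pyGetD pvAlphabet i ' ')) PySem.Dict.empty

def baconian_decrypt (ciphertext : String) : String :=
  let cleaned := PySem.Chars.upper (PySem.Chars.replace ciphertext.toList [' '] [])
  let plaintext := (PySem.List.pyRange 0 (cleaned.length : Int) 5).foldl (fun acc i =>
    let chunk := PySem.Chars.slice cleaned (some i) (some (i + 5))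
    match pvLookup.get? chunk with
    | some c => acc ++ [c]      -- chunk in lookup: plaintext += lookup[chunk]
    | none => acc ++ ['?']) []  -- else: plaintext += "?"
  String.ofList plaintext

-- ===== PORT B =====
-- value accumulated over the chunk: value = value*2 + (1 if c == 'B' else 0)
def pvValue (chunk : List Char) : Nat :=
  chunk.foldl (fun v c => v * 2 + (if c == 'B' then 1 else 0)) 0

def pvDecodeB (chunk : List Char) : Char :=
  if chunk.length == 5 && chunk.all (fun c => c == 'A' || c == 'B') then
    if pvValue chunk < 26 then PySem.List.pyGetD pvAlphabet (pvValue chunk : Int) '?' else '?'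
  else '?'

-- while cleaned: chunk, cleaned = cleaned[:5], cleaned[5:]
def pvAltLoop : List Char → List Char
  | [] => []
  | x :: xs => pvDecodeB ((x :: xs).take 5) :: pvAltLoop ((x :: xs).drop 5)
termination_by l => l.length
decreasing_by simp [List.length_drop]

def baconian_decrypt_alt (ciphertext : String) : String :=
  String.ofList (pvAltLoop (PySem.Chars.upper (PySem.Chars.replace ciphertext.toList [' '] [])))

-- ===== PRECONDITION & SPEC =====
def Spec_baconian_decrypt (ciphertext : String) (out : String) : Prop := out = baconian_decrypt_alt ciphertext
instance (ciphertext : String) (out : String) : Decidable (Spec_baconian_decrypt ciphertext out) := by unfold Spec_baconian_decrypt; infer_instance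

-- ===== CLAIM (what is proved, stated in full; the proofs are below) =====
def Claim_equal_baconian_decrypt : Prop := ∀ (ciphertext : String), Dom_baconian_decrypt ciphertext → Spec_baconian_decrypt ciphertext (baconian_decrypt ciphertext)

-- ===== LEMMAS AND PROOFS =====

-- A's per-chunk result, named for the proof
def pvDecodeA (chunk : List Char) : Char :=
  match pvLookup.get? chunk with
  | some c => c
  | none => '?'

-- B's chunk guard
def pvGuard (chunk : List Char) : Bool :=
  chunk.length == 5 && chunk.all (fun c => c == 'A' || c == 'B')

-- A's decoding loop, abstracted over the index list it folds over
def pvFoldA (l : List Char) (idxs : List Int) (acc : List Char) : List Char :=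
  idxs.foldl (fun acc i =>
    match pvLookup.get? (PySem.Chars.slice l (some i) (some (i + 5))) with
    | some c => acc ++ [c]
    | none => acc ++ ['?']) acc

lemma get?_eq_none_of_forall {κ ν : Type} [BEq κ] [LawfulBEq κ] (items : List (κ × ν)) (x : κ)
    (h : ∀ p ∈ items, p.1 ≠ x) : (PySem.Dict.mk items).get? x = none := by
  induction items with
  | nil => simp [PySem.Dict.get?]
  | cons p rest ih =>
    rw [PySem.Dict.get?_mk_cons]
    have hne : p.1 ≠ x := h p (by simp)
    simp [hne]
    exact ih (fun q hq => h q (by simp [hq]))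

lemma guard_of_mem_lookup : ∀ p ∈ pvLookup.items, pvGuard p.1 = true := by decide

lemma decodeA_eq_decodeB (chunk : List Char) : pvDecodeA chunk = pvDecodeB chunk := by
  by_cases hg : pvGuard chunk = true
  · -- length 5 and every char is 'A' or 'B': 32 concrete cases
    unfold pvGuard at hg
    simp only [Bool.and_eq_true, beq_iff_eq, List.all_eq_true, Bool.or_eq_true] at hg
    obtain ⟨hlen, hab⟩ := hg
    match chunk, hlen with
    | [a, b, c, d, e], _ =>
      have ha := hab a (by simp); have hb := hab b (by simp)
      have hc := hab c (by simp); have hd := hab d (by simp)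
      have he := hab e (by simp)
      rcases ha with ha | ha <;> rcases hb with hb | hb <;> rcases hc with hc | hc <;>
        rcases hd with hd | hd <;> rcases he with he | he <;> subst ha hb hc hd he <;> decide
  · -- guard fails: both sides are '?'
    have hA : pvDecodeA chunk = '?' := by
      have hnone : pvLookup.get? chunk = none := by
        have hitems : pvLookup = PySem.Dict.mk pvLookup.items := rfl
        rw [hitems]
        exact get?_eq_none_of_forall _ _ (fun p hp hpe => hg (hpe ▸ guard_of_mem_lookup p hp))
      simp [pvDecodeA, hnone]
    have hB : pvDecodeB chunk = '?' := by
      unfold pvDecodeB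
      unfold pvGuard at hg
      simp [hg]
    rw [hA, hB]

lemma pyRange_five (n : Nat) :
    PySem.List.pyRange 0 (n : Int) 5 =
      (List.range ((n + 4) / 5)).map (fun k : Nat => (0 : Int) + 5 * (k : Int)) := by
  rw [PySem.List.pyRange_of_pos 0 (n : Int) (by norm_num)]
  have h : (if (0 : Int) < (n : Int) then (((n : Int) - 0 + 5 - 1) / 5).toNat else 0)
      = (n + 4) / 5 := by
    split_ifs with h' <;> omega
  rw [h]

lemma slice_take (l : List Char) :
    PySem.Chars.slice l (some 0) (some (0 + 5)) = l.take 5 := by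
  norm_num [PySem.List.slice_to]
  rfl

lemma slice_shift (l : List Char) (k : Nat) :
    PySem.Chars.slice l (some ((0 : Int) + 5 * ((k : Int) + 1))) (some ((0 : Int) + 5 * ((k : Int) + 1) + 5)) =
      PySem.Chars.slice (l.drop 5) (some ((0 : Int) + 5 * (k : Int))) (some ((0 : Int) + 5 * (k : Int) + 5)) := by
  rw [PySem.Chars.slice_eq_listSlice, PySem.Chars.slice_eq_listSlice]
  have h1 : ((0 : Int) + 5 * ((k : Int) + 1)) = ((5 * (k + 1) : Nat) : Int) := by push_cast; ring
  have h2 : ((0 : Int) + 5 * ((k : Int) + 1) + 5) = ((5 * (k + 1) : Nat) : Int) + ((5 : Nat) : Int) := by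
    push_cast; ring
  have h3 : ((0 : Int) + 5 * (k : Int)) = ((5 * k : Nat) : Int) := by push_cast; ring
  have h4 : ((0 : Int) + 5 * (k : Int) + 5) = ((5 * k : Nat) : Int) + ((5 : Nat) : Int) := by push_cast; ring
  rw [h2, h1, h4, h3, PySem.List.slice_natCast_add, PySem.List.slice_natCast_add,
    List.drop_drop]
  congr 2
  omega

lemma foldA_cons (l : List Char) (i : Int) (idxs : List Int) (acc : List Char) :
    pvFoldA l (i :: idxs) acc =
      pvFoldA l idxs (acc ++ [pvDecodeA (PySem.Chars.slice l (some i) (some (i + 5)))]) := by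
  unfold pvFoldA pvDecodeA
  rw [List.foldl_cons]
  cases pvLookup.get? (PySem.Chars.slice l (some i) (some (i + 5))) <;> simp

lemma foldA_shift (m : Nat) (l : List Char) (acc : List Char) :
    pvFoldA l ((List.range m).map (fun k : Nat => (0 : Int) + 5 * ((k : Int) + 1))) acc =
      pvFoldA (l.drop 5) ((List.range m).map (fun k : Nat => (0 : Int) + 5 * (k : Int))) acc := by
  unfold pvFoldA
  rw [List.foldl_map, List.foldl_map]
  apply PySem.List.foldl_congr_mem
  intro a k _
  rw [slice_shift l k]

lemma loop_eq (m : Nat) : ∀ (l : List Char) (acc : List Char), m = (l.length + 4) / 5 →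
    pvFoldA l ((List.range m).map (fun k : Nat => (0 : Int) + 5 * (k : Int))) acc =
      acc ++ pvAltLoop l := by
  induction m with
  | zero =>
    intro l acc h
    have hl : l = [] := by
      cases l with
      | nil => rfl
      | cons x xs => exfalso; simp at h; omega
    subst hl
    rw [pvAltLoop.eq_1]
    simp [pvFoldA]
  | succ m ih =>
    intro l acc h
    have hl : l ≠ [] := by
      intro hnil; subst hnil; simp at h
    simp only [List.range_succ_eq_map, List.map_cons, List.map_map]
    rw [foldA_cons]
    have h0a : ((0 : Int) + 5 * ((0 : Nat) : Int)) = (0 : Int) := by norm_num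
    rw [h0a, slice_take, decodeA_eq_decodeB]
    have hcomp : ((fun k : Nat => (0 : Int) + 5 * (k : Int)) ∘ Nat.succ)
        = (fun k : Nat => (0 : Int) + 5 * ((k : Int) + 1)) := by
      funext k; simp [Function.comp]
    rw [hcomp, foldA_shift]
    rw [ih (l.drop 5) _ (by simp only [List.length_drop]; omega)]
    obtain ⟨x, xs, rfl⟩ := List.exists_cons_of_ne_nil hl
    rw [pvAltLoop.eq_2]
    simp

lemma loop_eq' (l : List Char) :
    List.foldl (fun acc i =>
      match pvLookup.get? (PySem.Chars.slice l (some i) (some (i + 5))) with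
      | some c => acc ++ [c]
      | none => acc ++ ['?']) [] (PySem.List.pyRange 0 (l.length : Int) 5) = pvAltLoop l := by
  rw [pyRange_five]
  exact loop_eq _ l [] rfl

theorem baconian_decrypt_equal (ciphertext : String) :
    baconian_decrypt ciphertext = baconian_decrypt_alt ciphertext := by
  unfold baconian_decrypt baconian_decrypt_alt
  exact congrArg String.ofList (loop_eq' _)

-- ===== VERDICT (by name: the statement is the Claim_ definition above) =====
theorem baconian_decrypt_spec : Claim_equal_baconian_decrypt := by
  intro ciphertext _
  unfold Spec_baconian_decrypt
  exact baconian_decrypt_equal ciphertext
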